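-- pv_equiv track=rewrite | github.com/KrazySnipeOof/Crypto-Strategy-tester | daily_bias_4h_strategy.py | get_session_group_and_candle_number
-- ===== SOURCE A (Python) =====
-- SESSION_GROUPS = {
--     'asia_reversal': {
--         'candle_1': 'ny_pm',      # 14:00-18:00 - Sets PCH/PCL
--         'candle_2': 'asia_open',   # 18:00-22:00 - Attacks Candle 1
--         'candle_3': 'frankfurt'   # 22:00-02:00 - Forms other side or consolidates
--     },
--     'london_reversal': {
--         'candle_1': 'frankfurt',  # 22:00-02:00 - Anchor for London
--         'candle_2': 'london',     # 02:00-06:00 - Creates trend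
--         'candle_3': 'ny_open'     # 06:00-10:00 - Reversal or continuation
--     },
--     'ny_6am_reversal': {
--         'candle_1': 'london',     # 02:00-06:00 - London leg
--         'candle_2': 'ny_open'    # 06:00-10:00 - NY Open reversal
--     },
--     'ny_10am_reversal': {
--         'candle_1': 'ny_open',    # 06:00-10:00 - NY morning leg
--         'candle_2': 'ny_silver'   # 10:00-14:00 - 10am reversal
--     }
-- }
--
-- def get_session_group_and_candle_number(session_name):
--     """
--     Determine which session group and candle number this session belongs to.
--
--     Returns: (group_name, candle_number) or (None, None) if not part of a tracked group
--     """
--     for group_name, candles in SESSION_GROUPS.items():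
--         if session_name == candles.get('candle_1'):
--             return (group_name, 1)
--         elif session_name == candles.get('candle_2'):
--             return (group_name, 2)
--         elif session_name == candles.get('candle_3'):
--             return (group_name, 3)
--
--     return (None, None)
-- ===== SOURCE B (Python) =====
-- SESSION_GROUPS = {
--     'asia_reversal': {
--         'candle_1': 'ny_pm',
--         'candle_2': 'asia_open',
--         'candle_3': 'frankfurt'
--     },
--     'london_reversal': {
--         'candle_1': 'frankfurt',
--         'candle_2': 'london',
--         'candle_3': 'ny_open'
--     },
--     'ny_6am_reversal': {
--         'candle_1': 'london',
--         'candle_2': 'ny_open'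
--     },
--     'ny_10am_reversal': {
--         'candle_1': 'ny_open',
--         'candle_2': 'ny_silver'
--     }
-- }
--
-- # Reverse lookup precomputed once: session name -> (group, candle number), first occurrence wins.
-- _REVERSE = {}
-- for _group, _candles in SESSION_GROUPS.items():
--     for _n in (1, 2, 3):
--         _name = _candles.get('candle_%d' % _n)
--         if _name is not None:
--             _REVERSE.setdefault(_name, (_group, _n))
--
-- def get_session_group_and_candle_number(session_name):
--     """
--     Determine which session group and candle number this session belongs to.
--
--     Returns: (group_name, candle_number) or (None, None) if not part of a tracked group
--     """
--     return _REVERSE.get(session_name, (None, None))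
-- ===== Notes on version B (the rewrite author's own statement) =====
-- stated objective: idiomatic
-- what changed: Replaced the per-call linear scan over SESSION_GROUPS (three .get comparisons per group) with a reverse-lookup dict precomputed once at module scope via setdefault (first occurrence wins), so the function body is a single dict .get with a default.
import Mathlib
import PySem

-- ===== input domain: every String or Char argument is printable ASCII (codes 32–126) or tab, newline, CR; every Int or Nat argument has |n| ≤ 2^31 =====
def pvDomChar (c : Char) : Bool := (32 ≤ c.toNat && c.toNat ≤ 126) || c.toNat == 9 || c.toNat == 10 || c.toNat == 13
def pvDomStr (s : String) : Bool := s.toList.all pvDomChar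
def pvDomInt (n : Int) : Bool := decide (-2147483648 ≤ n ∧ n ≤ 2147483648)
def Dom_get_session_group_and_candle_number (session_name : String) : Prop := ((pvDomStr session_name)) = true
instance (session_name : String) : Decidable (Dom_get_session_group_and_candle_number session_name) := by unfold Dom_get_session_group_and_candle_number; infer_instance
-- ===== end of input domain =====

-- B replaces A's per-call scan over SESSION_GROUPS by a reverse-lookup dict precomputed once at
-- module scope (first occurrence wins via setdefault); the function body is a single dict get.

-- ===== PORT A =====
def pvSessionGroups : List (String × PySem.Dict String String) :=
  [ ("asia_reversal",
      PySem.Dict.ofList [("candle_1", "ny_pm"), ("candle_2", "asia_open"), ("candle_3", "frankfurt")]),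
    ("london_reversal",
      PySem.Dict.ofList [("candle_1", "frankfurt"), ("candle_2", "london"), ("candle_3", "ny_open")]),
    ("ny_6am_reversal",
      PySem.Dict.ofList [("candle_1", "london"), ("candle_2", "ny_open")]),
    ("ny_10am_reversal",
      PySem.Dict.ofList [("candle_1", "ny_open"), ("candle_2", "ny_silver")]) ]

-- Python compares the str session_name with candles.get(...): equal exactly when the get returned
-- that same string (a comparison with a missing candle, i.e. None, is False) — exact for str input.
def pvLoopA : String → List (String × PySem.Dict String String) → Option String × Option Int
  | _, [] => (none, none)
  | s, (group_name, candles) :: rest =>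
    if candles.get? "candle_1" == some s then (some group_name, some 1)
    else if candles.get? "candle_2" == some s then (some group_name, some 2)
    else if candles.get? "candle_3" == some s then (some group_name, some 3)
    else pvLoopA s rest

def get_session_group_and_candle_number (session_name : String) : Option String × Option Int :=
  pvLoopA session_name pvSessionGroups

-- ===== PORT B =====
-- _REVERSE built once: for each group, slots 1..3 in order; setdefault = first occurrence wins.
def pvReverse : PySem.Dict String (String × Int) :=
  pvSessionGroups.foldl
    (fun d gc =>
      ([1, 2, 3] : List Int).foldl
        (fun d n =>
          match gc.2.get? ("candle_" ++ PySem.Int.toStr n) with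
          | some name => d.setdefault name (gc.1, n)
          | none => d) d)
    PySem.Dict.empty

-- _REVERSE.get(session_name, (None, None)); the stored (group, n) pair is returned with its
-- components wrapped in `some` to fit the Optional result type.
def get_session_group_and_candle_number_alt (session_name : String) : Option String × Option Int :=
  match pvReverse.get? session_name with
  | some gn => (some gn.1, some gn.2)
  | none => (none, none)

-- ===== PRECONDITION & SPEC =====
def Spec_get_session_group_and_candle_number (session_name : String) (out : Option String × Option Int) : Prop := out = get_session_group_and_candle_number_alt session_name
instance (session_name : String) (out : Option String × Option Int) : Decidable (Spec_get_session_group_and_candle_number session_name out) := by unfold Spec_get_session_group_and_candle_number; infer_instance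

-- ===== CLAIM (what is proved, stated in full; the proofs are below) =====
def Claim_equal_get_session_group_and_candle_number : Prop := ∀ (session_name : String), Dom_get_session_group_and_candle_number session_name → Spec_get_session_group_and_candle_number session_name (get_session_group_and_candle_number session_name)

-- ===== LEMMAS AND PROOFS =====

-- the common closed form both ports reduce to
def pvTable (s : String) : Option String × Option Int :=
  if "ny_pm" = s then (some "asia_reversal", some 1)
  else if "asia_open" = s then (some "asia_reversal", some 2)
  else if "frankfurt" = s then (some "asia_reversal", some 3)
  else if "london" = s then (some "london_reversal", some 2)
  else if "ny_open" = s then (some "london_reversal", some 3)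
  else if "ny_silver" = s then (some "ny_10am_reversal", some 2)
  else (none, none)

-- B's module-scope fold evaluates to this literal dict
lemma pvReverse_eq : pvReverse = PySem.Dict.mk
    [("ny_pm", ("asia_reversal", 1)), ("asia_open", ("asia_reversal", 2)),
     ("frankfurt", ("asia_reversal", 3)), ("london", ("london_reversal", 2)),
     ("ny_open", ("london_reversal", 3)), ("ny_silver", ("ny_10am_reversal", 2))] := rfl

lemma pvAltEq (s : String) :
    get_session_group_and_candle_number_alt s = pvTable s := by
  simp only [get_session_group_and_candle_number_alt, pvReverse_eq, PySem.Dict.get?_mk_cons,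
    pvTable, beq_iff_eq]
  split_ifs <;> rfl

-- the four group dicts of A, with their candle lookups evaluated
def pvD1 : PySem.Dict String String := PySem.Dict.mk [("candle_1", "ny_pm"), ("candle_2", "asia_open"), ("candle_3", "frankfurt")]
def pvD2 : PySem.Dict String String := PySem.Dict.mk [("candle_1", "frankfurt"), ("candle_2", "london"), ("candle_3", "ny_open")]
def pvD3 : PySem.Dict String String := PySem.Dict.mk [("candle_1", "london"), ("candle_2", "ny_open")]
def pvD4 : PySem.Dict String String := PySem.Dict.mk [("candle_1", "ny_open"), ("candle_2", "ny_silver")]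

lemma pvC11 : pvD1.get? "candle_1" = some "ny_pm" := rfl
lemma pvC12 : pvD1.get? "candle_2" = some "asia_open" := rfl
lemma pvC13 : pvD1.get? "candle_3" = some "frankfurt" := rfl
lemma pvC21 : pvD2.get? "candle_1" = some "frankfurt" := rfl
lemma pvC22 : pvD2.get? "candle_2" = some "london" := rfl
lemma pvC23 : pvD2.get? "candle_3" = some "ny_open" := rfl
lemma pvC31 : pvD3.get? "candle_1" = some "london" := rfl
lemma pvC32 : pvD3.get? "candle_2" = some "ny_open" := rfl
lemma pvC33 : pvD3.get? "candle_3" = none := rfl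
lemma pvC41 : pvD4.get? "candle_1" = some "ny_open" := rfl
lemma pvC42 : pvD4.get? "candle_2" = some "ny_silver" := rfl
lemma pvC43 : pvD4.get? "candle_3" = none := rfl

lemma pvSessionGroups_eq : pvSessionGroups =
    [("asia_reversal", pvD1), ("london_reversal", pvD2),
     ("ny_6am_reversal", pvD3), ("ny_10am_reversal", pvD4)] := rfl

lemma pvAEq (s : String) : get_session_group_and_candle_number s = pvTable s := by
  simp only [get_session_group_and_candle_number, pvSessionGroups_eq, pvLoopA,
    pvC11, pvC12, pvC13, pvC21, pvC22, pvC23, pvC31, pvC32, pvC33, pvC41, pvC42, pvC43,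
    pvTable, Option.some_beq_some, beq_iff_eq, Option.none_beq_some, Bool.false_eq_true, if_false]
  split_ifs <;> simp_all

-- ===== VERDICT (by name: the statement is the Claim_ definition above) =====
theorem get_session_group_and_candle_number_spec : Claim_equal_get_session_group_and_candle_number := by
  intro s _
  show get_session_group_and_candle_number s = get_session_group_and_candle_number_alt s
  rw [pvAEq s, pvAltEq s]
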